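-- pv_equiv track=rewrite | github.com/MohitPanchariya/mgit | src/mgit/diff.py | iterChangedFiles
-- ===== SOURCE A (Python) =====
-- from collections import defaultdict
--
-- def groupTrees(*trees):
--     '''
--     Group the given trees by file paths and their oids
--     across different commits.
--     The function yields a file path along with a list of
--     object ids for the file in the given list of trees.
--     The entries in the list are ordered in the order of trees.
--     If a file didn't exist during a particular commit, its
--     oids in the list is set to None.
--     '''
--     entries = defaultdict(lambda: [None] * len(trees))
--
--     for i, tree in enumerate(trees):
--         if tree:
--             for path, oid in tree.items():
--                 entries[path][i] = oid
--
--     for path, oids in entries.items():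
--         yield (path, *oids)
--
-- def iterChangedFiles(fromTree, toTree):
--     '''
--     Yields an action(modified, new file, deleted, unchanged) for
--     each file in the given trees.
--     '''
--     for path, fromOid, toOid in groupTrees(fromTree, toTree):
--         if not fromOid:
--             action = "New File"
--         elif not toOid:
--             action = "Deleted"
--         elif fromOid != toOid:
--             action = "Modified"
--         else:
--             action = "Unchanged"
--         yield path, action
-- ===== SOURCE B (Python) =====
-- def iterChangedFiles(fromTree, toTree):
--     '''
--     Yields an action (modified, new file, deleted, unchanged) for
--     each file in the given trees, in two staged passes: first every
--     path of fromTree is classified against toTree, then the paths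
--     that exist only in toTree are emitted as new files.
--     '''
--     ft = fromTree or {}
--     tt = toTree or {}
--     for path, fromOid in ft.items():
--         if not fromOid:
--             yield path, "New File"
--         elif not tt.get(path):
--             yield path, "Deleted"
--         elif fromOid != tt[path]:
--             yield path, "Modified"
--         else:
--             yield path, "Unchanged"
--     for path in tt:
--         if path not in ft:
--             yield path, "New File"
-- ===== Notes on version B (the rewrite author's own statement) =====
-- stated objective: simpler
-- what changed: Drops groupTrees's merged defaultdict of [fromOid, toOid] slots entirely: B is two staged passes that never build a union key structure - first it classifies every fromTree entry against toTree, then it appends the toTree-only paths as new files.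
import Mathlib
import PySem

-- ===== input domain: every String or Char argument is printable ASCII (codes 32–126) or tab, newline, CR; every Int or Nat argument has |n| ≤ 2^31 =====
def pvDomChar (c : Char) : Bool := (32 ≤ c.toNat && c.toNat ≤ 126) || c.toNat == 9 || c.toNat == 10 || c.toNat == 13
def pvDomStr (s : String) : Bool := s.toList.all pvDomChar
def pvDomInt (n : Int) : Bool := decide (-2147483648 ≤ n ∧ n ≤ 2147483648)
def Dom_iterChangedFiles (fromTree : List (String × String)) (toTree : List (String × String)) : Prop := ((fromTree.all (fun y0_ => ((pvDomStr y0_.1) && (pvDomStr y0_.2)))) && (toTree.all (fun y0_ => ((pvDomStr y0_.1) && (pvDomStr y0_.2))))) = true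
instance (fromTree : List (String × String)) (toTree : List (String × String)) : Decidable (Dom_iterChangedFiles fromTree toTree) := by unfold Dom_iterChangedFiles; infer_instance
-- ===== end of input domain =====

-- B drops groupTrees's merged defaultdict of oid pairs: two staged passes — classify the
-- fromTree entries against toTree, then append the toTree-only paths as "New File"
-- (objective: simpler; no union key structure is built).

-- ===== PORT A =====
-- groupTrees(fromTree, toTree): entries = defaultdict(lambda: [None, None]);
-- loop i over the two trees, entries[path][i] = oid; then classify each entry.
-- 'if tree:' — an empty dict is falsy and its loop is skipped; 'not oid' is true for the empty string
def iterChangedFiles (fromTree : List (String × String)) (toTree : List (String × String)) : List (String × String) :=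
  let ftD := PySem.Dict.ofList fromTree
  let ttD := PySem.Dict.ofList toTree
  let e0 : PySem.Dict String (Option String × Option String) := PySem.Dict.empty
  let e1 := if ftD.items ≠ [] then
      ftD.items.foldl (fun e pr => e.modify pr.1 (none, none) (fun v => (some pr.2, v.2))) e0
    else e0
  let e2 := if ttD.items ≠ [] then
      ttD.items.foldl (fun e pr => e.modify pr.1 (none, none) (fun v => (v.1, some pr.2))) e1
    else e1
  e2.items.map (fun pr =>
    if (pr.2.1.getD "") == "" then (pr.1, "New File")
    else if (pr.2.2.getD "") == "" then (pr.1, "Deleted")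
    else if pr.2.1 != pr.2.2 then (pr.1, "Modified")
    else (pr.1, "Unchanged"))


-- ===== PORT B =====
-- pass 1: every fromTree entry classified against toTree; pass 2: toTree-only paths as new files
def iterChangedFiles_alt (fromTree : List (String × String)) (toTree : List (String × String)) : List (String × String) :=
  let ftD := PySem.Dict.ofList fromTree
  let ttD := PySem.Dict.ofList toTree
  (ftD.items.map (fun pr =>
      if pr.2 == "" then (pr.1, "New File")
      else if ((ttD.get? pr.1).getD "") == "" then (pr.1, "Deleted")
      else if pr.2 != (ttD.get? pr.1).getD "" then (pr.1, "Modified")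
      else (pr.1, "Unchanged")))
  ++ ttD.keys.filterMap (fun path =>
      if ftD.contains path then none else some (path, "New File"))


-- ===== PRECONDITION & SPEC =====
def Spec_iterChangedFiles (fromTree : List (String × String)) (toTree : List (String × String)) (out : List (String × String)) : Prop := out = iterChangedFiles_alt fromTree toTree
instance (fromTree : List (String × String)) (toTree : List (String × String)) (out : List (String × String)) : Decidable (Spec_iterChangedFiles fromTree toTree out) := by unfold Spec_iterChangedFiles; infer_instance

-- ===== CLAIM =====
def Claim_equal_iterChangedFiles : Prop := ∀ (fromTree : List (String × String)) (toTree : List (String × String)), Dom_iterChangedFiles fromTree toTree → Spec_iterChangedFiles fromTree toTree (iterChangedFiles fromTree toTree)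

-- ===== LEMMAS AND PROOFS =====

-- the 'if tree:' guard is vacuous: the fold over an empty item list is the identity
theorem if_ne_nil_foldl {α β : Type} (l : List α) (f : β → α → β) (d : β) :
    (if l ≠ [] then l.foldl f d else d) = l.foldl f d := by
  cases l <;> simp


-- folding PySem.Set.add from a seed appends the unseen elements in order
theorem foldl_set_add (t f : List String) (ht : t.Nodup) :
    t.foldl PySem.Set.add f = f ++ t.filter (fun x => decide (x ∉ f)) := by
  induction t generalizing f with
  | nil => simp
  | cons a t' ih =>
    simp only [List.nodup_cons] at ht
    rw [List.foldl_cons]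
    by_cases ha : a ∈ f
    · have : PySem.Set.add f a = f := by simp [PySem.Set.add, ha]
      rw [this, ih f ht.2]
      simp [List.filter_cons, ha]
    · have : PySem.Set.add f a = f ++ [a] := by simp [PySem.Set.add, ha]
      rw [this, ih (f ++ [a]) ht.2]
      have hfilter : t'.filter (fun x => decide (x ∉ f ++ [a])) = t'.filter (fun x => decide (x ∉ f)) := by
        apply List.filter_congr
        intro x hx
        have : x ≠ a := fun h => ht.1 (h ▸ hx)
        simp [this]
      rw [hfilter]
      simp [List.filter_cons, ha]


-- ordered dedup of two duplicate-free lists: the first list, then the second filtered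
theorem dedup_append_nodup (f t : List String) (hf : f.Nodup) (ht : t.Nodup) :
    PySem.List.dedup (f ++ t) = f ++ t.filter (fun x => decide (x ∉ f)) := by
  have h1 : PySem.List.dedup (f ++ t) = t.foldl PySem.Set.add (f.foldl PySem.Set.add []) := by
    simp [PySem.List.dedup, PySem.Set.ofList_eq_foldl, List.foldl_append]
  have h2 : f.foldl PySem.Set.add ([] : List String) = f := by
    rw [foldl_set_add f [] hf]; simp
  rw [h1, h2, foldl_set_add t f ht]


-- a filterMap whose function is an if-none/some is a filter-then-map
theorem filterMap_if {α β : Type} (l : List α) (p : α → Bool) (g : α → β) :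
    l.filterMap (fun x => if p x then none else some (g x)) = (l.filter (fun x => !p x)).map g := by
  induction l with
  | nil => rfl
  | cons a l ih => by_cases h : p a <;> simp [List.filterMap_cons, List.filter_cons, h, ih]


-- A's first fold fills the first slot of each entry
theorem getD_fold_fst (l : List (String × String)) (hl : (l.map Prod.fst).Nodup)
    (d : PySem.Dict String (Option String × Option String)) (k : String) :
    (l.foldl (fun e pr => e.modify pr.1 (none, none) (fun v => (some pr.2, v.2))) d).getD k (none, none)
      = match (PySem.Dict.mk l).get? k with
        | some o => (some o, (d.getD k (none, none)).2)
        | none => d.getD k (none, none) := by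
  induction l generalizing d with
  | nil => simp [PySem.Dict.get?]
  | cons p rest ih =>
    simp only [List.map_cons, List.nodup_cons] at hl
    rw [List.foldl_cons, ih hl.2, PySem.Dict.get?_mk_cons]
    by_cases hk : p.1 = k
    · subst hk
      have hrest : (PySem.Dict.mk rest).get? p.1 = none := by
        rw [PySem.Dict.get?_eq_none_iff_not_mem_keys]
        simpa [PySem.Dict.keys] using hl.1
      simp [hrest, PySem.Dict.getD_modify_self]
    · rw [PySem.Dict.getD_modify]; simp [hk, Ne.symm hk]


-- A's second fold fills the second slot of each entry
theorem getD_fold_snd (l : List (String × String)) (hl : (l.map Prod.fst).Nodup)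
    (d : PySem.Dict String (Option String × Option String)) (k : String) :
    (l.foldl (fun e pr => e.modify pr.1 (none, none) (fun v => (v.1, some pr.2))) d).getD k (none, none)
      = match (PySem.Dict.mk l).get? k with
        | some o => ((d.getD k (none, none)).1, some o)
        | none => d.getD k (none, none) := by
  induction l generalizing d with
  | nil => simp [PySem.Dict.get?]
  | cons p rest ih =>
    simp only [List.map_cons, List.nodup_cons] at hl
    rw [List.foldl_cons, ih hl.2, PySem.Dict.get?_mk_cons]
    by_cases hk : p.1 = k
    · subst hk
      have hrest : (PySem.Dict.mk rest).get? p.1 = none := by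
        rw [PySem.Dict.get?_eq_none_iff_not_mem_keys]
        simpa [PySem.Dict.keys] using hl.1
      simp [hrest, PySem.Dict.getD_modify_self]
    · rw [PySem.Dict.getD_modify]; simp [hk, Ne.symm hk]

theorem iterChangedFiles_spec' (fromTree toTree : List (String × String)) :
    iterChangedFiles fromTree toTree = iterChangedFiles_alt fromTree toTree := by
  unfold iterChangedFiles iterChangedFiles_alt
  simp only [if_ne_nil_foldl]
  set ftD := PySem.Dict.ofList fromTree with hft
  set ttD := PySem.Dict.ofList toTree with htt
  have hnf : ftD.keys.Nodup := PySem.Dict.nodup_keys_ofList fromTree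
  have hnt : ttD.keys.Nodup := PySem.Dict.nodup_keys_ofList toTree
  set e1 := ftD.items.foldl (fun e pr => e.modify pr.1 (none, none) (fun v => (some pr.2, v.2))) PySem.Dict.empty with he1
  set e2 := ttD.items.foldl (fun e pr => e.modify pr.1 (none, none) (fun v => (v.1, some pr.2))) e1 with he2
  have hmkf : PySem.Dict.mk ftD.items = ftD := rfl
  have hmkt : PySem.Dict.mk ttD.items = ttD := rfl
  have hval : ∀ k, e2.getD k (none, none) = (ftD.get? k, ttD.get? k) := by
    intro k
    have h1 : e1.getD k (none, none) = (ftD.get? k, none) := by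
      rw [he1, getD_fold_fst _ (by simpa [PySem.Dict.keys] using hnf), hmkf]
      cases ftD.get? k <;> simp [PySem.Dict.getD_empty]
    rw [he2, getD_fold_snd _ (by simpa [PySem.Dict.keys] using hnt), hmkt, h1]
    cases ttD.get? k <;> simp
  have hkeys : e2.keys = PySem.List.dedup (ftD.keys ++ ttD.keys) := by
    rw [he2, he1,
      PySem.Dict.keys_foldl_modify_key (key := Prod.fst),
      PySem.Dict.keys_foldl_modify_key (key := Prod.fst)]
    show PySem.Set.update (PySem.Set.update PySem.Dict.empty.keys ftD.keys) ttD.keys = _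
    rw [PySem.List.dedup_eq_ofList]
    simp [PySem.Set.update, PySem.Set.ofList_eq_foldl, PySem.Dict.keys_empty, List.foldl_append]
  have hnd : e2.keys.Nodup := by
    rw [hkeys]; exact PySem.List.nodup_dedup _
  rw [PySem.Dict.items_eq_map_keys e2 hnd (none, none), List.map_map, hkeys,
    dedup_append_nodup _ _ hnf hnt, List.map_append]
  congr 1
  · -- first segment: map over ftD.keys = map over ftD.items
    rw [PySem.Dict.items_eq_map_keys ftD hnf "", List.map_map]
    refine List.map_congr_left ?_
    intro k hk
    obtain ⟨v, hv⟩ : ∃ v, ftD.get? k = some v := by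
      rcases h : ftD.get? k with _ | v
      · rw [PySem.Dict.get?_eq_none_iff_not_mem_keys] at h
        exact absurd hk h
      · exact ⟨v, rfl⟩
    have hgd : ftD.getD k "" = v := PySem.Dict.getD_of_get?_eq_some ftD "" hv
    simp only [Function.comp, hval k, hv, hgd, Option.getD_some]
    by_cases h1 : v = ""
    · simp [h1]
    · simp only [h1, beq_iff_eq, if_neg h1]
      rcases h2 : ttD.get? k with _ | w
      · simp
      · simp only [Option.getD_some]
        by_cases h3 : w = ""
        · simp [h3]
        · simp [h3, bne]
  · -- second segment: toTree-only keys
    rw [filterMap_if]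
    have : (ttD.keys.filter (fun x => decide (x ∉ ftD.keys))) = (ttD.keys.filter (fun x => !ftD.contains x)) := by
      apply List.filter_congr
      intro x _
      simp [PySem.Dict.contains_eq_decide_mem_keys]
    rw [← this]
    refine List.map_congr_left ?_
    intro k hk
    rw [List.mem_filter] at hk
    have hnotf : k ∉ ftD.keys := by simpa using hk.2
    have hnone : ftD.get? k = none := (PySem.Dict.get?_eq_none_iff_not_mem_keys (d := ftD) (k := k)).mpr hnotf
    simp [hval k, hnone]

-- ===== VERDICT =====
theorem iterChangedFiles_spec : Claim_equal_iterChangedFiles := by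
  intro fromTree toTree _
  exact iterChangedFiles_spec' fromTree toTree
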